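-- pv_equiv track=rewrite | github.com/liuguangxi/rosecode | Codes/rc311/rc311.py | nimber_square
-- ===== SOURCE A (Python) =====
-- def ilog2(n):
--   return 0 if n <= 0 else n.bit_length() - 1
--
-- def nimber_lv(n):
--   if n <= 1:
--     return 0
--   return ilog2(ilog2(n)) + 1
--
-- def nimber_combine(n, a, b):
--   return (b << (1 << n)) | a
--
-- def nimber_split(n, a):
--   t = 1 << n
--   return a & ((1 << t) - 1), a >> t
--
-- def nimber_product_half(n, a):
--   if n == 0:
--     return a
--   if a == 0:
--     return 0
--   lo, hi = nimber_split(n - 1, a)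
--   lo, hi = \
--     nimber_product_half(n - 1, nimber_product_half(n - 1, hi)), \
--     nimber_product_half(n - 1, hi ^ lo)
--   return nimber_combine(n - 1, lo, hi)
--
-- def nimber_square(a):
--   if a <= 1:
--     return a
--   lv = nimber_lv(a)
--   lo, hi = nimber_split(lv - 1, a)
--   lo = nimber_square(lo)
--   hi = nimber_square(hi)
--   lo = nimber_product_half(lv - 1, hi) ^ lo
--   return nimber_combine(lv - 1, lo, hi)
-- ===== SOURCE B (Python) =====
-- def _nim_mul(n, a, b):
--     # nimber product of a, b < 2**(2**n), recursing on the field level n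
--     if n == 0:
--         return a & b  # GF(2): 0 or 1 each
--     t = 1 << (n - 1)
--     half = 1 << t
--     al, ah = a & (half - 1), a >> t
--     bl, bh = b & (half - 1), b >> t
--     low = _nim_mul(n - 1, al, bl)
--     hh = _nim_mul(n - 1, ah, bh)
--     cross = _nim_mul(n - 1, al ^ ah, bl ^ bh) ^ low ^ hh
--     return ((cross ^ hh) << t) ^ _nim_mul(n - 1, hh, half >> 1) ^ low
--
-- def nimber_square(a):
--     if a <= 1:
--         return a
--     n = (a.bit_length() - 1).bit_length()  # smallest n with a < 2**(2**n)
--     return _nim_mul(n, a, a)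
-- ===== Notes on version B (the rewrite author's own statement) =====
-- stated objective: alternative
-- what changed: Replaces A's specialised nim-square recursion (with its nimber_product_half helper) by a single general level-recursive Karatsuba-style nimber multiplication _nim_mul(n,a,b) and computes the square as _nim_mul(level(a), a, a).
import Mathlib
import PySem

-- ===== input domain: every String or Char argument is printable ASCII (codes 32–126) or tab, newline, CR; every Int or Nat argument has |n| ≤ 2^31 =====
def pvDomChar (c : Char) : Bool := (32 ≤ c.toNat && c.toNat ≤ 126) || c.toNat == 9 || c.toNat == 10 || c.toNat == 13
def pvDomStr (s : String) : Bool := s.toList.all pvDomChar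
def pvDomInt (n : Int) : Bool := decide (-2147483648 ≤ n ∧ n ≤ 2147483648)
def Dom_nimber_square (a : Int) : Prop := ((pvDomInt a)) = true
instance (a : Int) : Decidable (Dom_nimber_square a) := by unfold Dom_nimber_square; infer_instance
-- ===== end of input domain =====

-- B replaces A's specialised nim-square recursion by a general level-recursive nimber
-- multiplication and squares as nimber_square a = nim_mul(level a, a, a) (objective: alternative).

-- ===== PORT A =====
-- Python works on int; for a ≥ 2 all intermediate values are nonnegative, so the bit-level
-- recursion is ported on Nat and the Int wrapper keeps Python's `a <= 1` early return exactly.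
def pyIlog2 (n : Nat) : Nat := if n = 0 then 0 else Nat.log2 n   -- n.bit_length()-1 (n ≤ 0 → 0)
def nimLv (n : Nat) : Nat := if n ≤ 1 then 0 else pyIlog2 (pyIlog2 n) + 1
def nimCombine (n a b : Nat) : Nat := (b <<< (1 <<< n)) ||| a
def nimSplit (n a : Nat) : Nat × Nat := (a &&& ((1 <<< (1 <<< n)) - 1), a >>> (1 <<< n))

def nimProductHalf : Nat → Nat → Nat
  | 0, a => a
  | n+1, a =>
    if a = 0 then 0
    else
      let p := nimSplit n a
      nimCombine n (nimProductHalf n (nimProductHalf n p.2)) (nimProductHalf n (p.2 ^^^ p.1))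

theorem pv_split_snd_lt (k a : Nat) (ha : 2 ≤ a) : (nimSplit k a).2 < a := by
  have h1 : (1:Nat) < 2 ^ (1 <<< k) := by
    have h0 : (1:Nat) ≤ 1 <<< k := by
      rw [Nat.one_shiftLeft]; exact Nat.one_le_two_pow
    calc (1:Nat) < 2 ^ 1 := by norm_num
    _ ≤ 2 ^ (1 <<< k) := Nat.pow_le_pow_right (by norm_num) h0
  simp only [nimSplit, Nat.shiftRight_eq_div_pow]
  exact Nat.div_lt_self (by omega) h1

theorem pv_two_pow_lv_le (a : Nat) (ha : 2 ≤ a) : 2 ^ (1 <<< (nimLv a - 1)) ≤ a := by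
  have hlog : Nat.log2 a ≠ 0 := by
    have := (Nat.le_log2 (n := a) (by omega)).2 (by rw [pow_one]; exact ha)
    omega
  have h1 : 2 ^ Nat.log2 (Nat.log2 a) ≤ Nat.log2 a := Nat.log2_self_le hlog
  have h2 : 2 ^ Nat.log2 a ≤ a := Nat.log2_self_le (by omega)
  have hlv : nimLv a - 1 = Nat.log2 (Nat.log2 a) := by
    have h3 : ¬ a ≤ 1 := by omega
    have h4 : ¬ a = 0 := by omega
    simp [nimLv, pyIlog2, h3, h4, hlog]
  rw [hlv, Nat.one_shiftLeft]
  calc 2 ^ 2 ^ Nat.log2 (Nat.log2 a) ≤ 2 ^ Nat.log2 a := Nat.pow_le_pow_right (by norm_num) h1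
  _ ≤ a := h2

theorem pv_split_fst_lt (a : Nat) (ha : 2 ≤ a) : (nimSplit (nimLv a - 1) a).1 < a := by
  have h2 := pv_two_pow_lv_le a ha
  simp only [nimSplit, Nat.one_shiftLeft]
  have hle : a &&& (2 ^ (2 ^ (nimLv a - 1)) - 1) ≤ 2 ^ (2 ^ (nimLv a - 1)) - 1 := Nat.and_le_right
  rw [Nat.one_shiftLeft] at h2
  omega

def nsqA (a : Nat) : Nat :=
  if a ≤ 1 then a
  else
    let lv := nimLv a
    let lo := (nimSplit (lv - 1) a).1
    let hi := (nimSplit (lv - 1) a).2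
    nimCombine (lv - 1) (nimProductHalf (lv - 1) (nsqA hi) ^^^ nsqA lo) (nsqA hi)
termination_by a
decreasing_by
  all_goals first
    | exact pv_split_snd_lt _ _ (by omega)
    | exact pv_split_fst_lt _ (by omega)

def nimber_square (a : Int) : Int :=
  if a ≤ 1 then a else (nsqA a.toNat : Int)

-- ===== PORT B =====
-- Source B: level-recursive general nimber multiplication; nimber_square(a) = _nim_mul(n, a, a).
def bitLen (n : Nat) : Nat := if n = 0 then 0 else Nat.log2 n + 1   -- n.bit_length()

def nimMulB : Nat → Nat → Nat → Nat
  | 0, a, b => a &&& b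
  | n+1, a, b =>
    let t := 1 <<< n
    let half := 1 <<< t
    let al := a &&& (half - 1)
    let ah := a >>> t
    let bl := b &&& (half - 1)
    let bh := b >>> t
    let low := nimMulB n al bl
    let hh := nimMulB n ah bh
    let cross := nimMulB n (al ^^^ ah) (bl ^^^ bh) ^^^ low ^^^ hh
    ((cross ^^^ hh) <<< t) ^^^ nimMulB n hh (half >>> 1) ^^^ low

def nimber_square_alt (a : Int) : Int :=
  if a ≤ 1 then a
  else (nimMulB (bitLen (bitLen a.toNat - 1)) a.toNat a.toNat : Int)

-- ===== PRECONDITION & SPEC =====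
def Spec_nimber_square (a : Int) (out : Int) : Prop := out = nimber_square_alt a
instance (a : Int) (out : Int) : Decidable (Spec_nimber_square a out) := by unfold Spec_nimber_square; infer_instance

-- ===== CLAIM (what is proved, stated in full; the proofs are below) =====
def Claim_equal_nimber_square : Prop := ∀ (a : Int), Dom_nimber_square a → Spec_nimber_square a (nimber_square a)

-- ===== LEMMAS AND PROOFS =====

-- nsqL n is A's square recursion indexed by an explicit field level n (valid for a < 2^(2^n)).
def nsqL : Nat → Nat → Nat
  | 0, a => a
  | n+1, a =>
    nimCombine n (nimProductHalf n (nsqL n (nimSplit n a).2) ^^^ nsqL n (nimSplit n a).1)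
      (nsqL n (nimSplit n a).2)

theorem nimSplit_eq (n a : Nat) : nimSplit n a = (a % 2 ^ 2 ^ n, a / 2 ^ 2 ^ n) := by
  simp [nimSplit, Nat.one_shiftLeft, Nat.and_two_pow_sub_one_eq_mod, Nat.shiftRight_eq_div_pow]

theorem pow_pow_succ (n : Nat) : (2:Nat) ^ 2 ^ (n+1) = 2 ^ 2 ^ n * 2 ^ 2 ^ n := by
  rw [← pow_add]; congr 1; rw [pow_succ]; omega

theorem lor_shl_eq_xor (a b t : Nat) (ha : a < 2 ^ t) : (b <<< t) ||| a = (b <<< t) ^^^ a := by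
  apply Nat.eq_of_testBit_eq
  intro i
  rw [Nat.testBit_lor, Nat.testBit_xor]
  by_cases h : t ≤ i
  · have hf : a.testBit i = false :=
      Nat.testBit_lt_two_pow (lt_of_lt_of_le ha (Nat.pow_le_pow_right (by norm_num) h))
    simp [hf]
  · have hf : (b <<< t).testBit i = false := by
      rw [Nat.testBit_shiftLeft]; simp [h]
    simp [hf]

theorem nimCombine_eq (n a b : Nat) (ha : a < 2 ^ 2 ^ n) :
    nimCombine n a b = (b <<< 2 ^ n) ^^^ a := by
  rw [nimCombine, Nat.one_shiftLeft, lor_shl_eq_xor _ _ _ (by simpa [Nat.one_shiftLeft] using ha)]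

theorem nimCombine_lt (n a b : Nat) (ha : a < 2 ^ 2 ^ n) (hb : b < 2 ^ 2 ^ n) :
    nimCombine n a b < 2 ^ 2 ^ (n+1) := by
  rw [nimCombine, Nat.one_shiftLeft]
  apply Nat.or_lt_two_pow
  · rw [Nat.shiftLeft_eq, pow_pow_succ]
    exact Nat.mul_lt_mul_of_lt_of_le hb le_rfl (Nat.two_pow_pos _)
  · exact lt_of_lt_of_le ha (Nat.pow_le_pow_right (by norm_num)
      (Nat.pow_le_pow_right (by norm_num) (by omega)))

theorem split_fst_lt (n a : Nat) : (nimSplit n a).1 < 2 ^ 2 ^ n := by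
  rw [nimSplit_eq]; exact Nat.mod_lt _ (Nat.two_pow_pos _)

theorem split_snd_lt (n a : Nat) (ha : a < 2 ^ 2 ^ (n+1)) : (nimSplit n a).2 < 2 ^ 2 ^ n := by
  rw [nimSplit_eq]
  exact (Nat.div_lt_iff_lt_mul (Nat.two_pow_pos _)).2
    (by rwa [← pow_pow_succ])

theorem nph_zero (n : Nat) : nimProductHalf n 0 = 0 := by
  cases n <;> simp [nimProductHalf]

theorem nph_lt (n : Nat) : ∀ a, a < 2 ^ 2 ^ n → nimProductHalf n a < 2 ^ 2 ^ n := by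
  induction n with
  | zero => intro a ha; simpa [nimProductHalf] using ha
  | succ n ih =>
    intro a ha
    by_cases h0 : a = 0
    · subst h0; rw [nph_zero]; exact Nat.two_pow_pos _
    · simp only [nimProductHalf, h0, if_false]
      exact nimCombine_lt _ _ _ (ih _ (ih _ (split_snd_lt _ _ ha)))
        (ih _ (Nat.xor_lt_two_pow (split_snd_lt _ _ ha) (split_fst_lt _ _)))

theorem nph_xor (n : Nat) : ∀ x y, x < 2 ^ 2 ^ n → y < 2 ^ 2 ^ n →
    nimProductHalf n (x ^^^ y) = nimProductHalf n x ^^^ nimProductHalf n y := by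
  induction n with
  | zero => intro x y _ _; simp [nimProductHalf]
  | succ n ih =>
    intro x y hx hy
    by_cases hx0 : x = 0
    · subst hx0; rw [nph_zero]; simp
    by_cases hy0 : y = 0
    · subst hy0; rw [nph_zero]; simp
    by_cases hxy : x ^^^ y = 0
    · have hxey : x = y := by
        have := Nat.xor_eq_zero_iff.mp hxy
        exact this
      subst hxey
      rw [hxy, nph_zero, Nat.xor_self]
    · have e1 : (nimSplit n (x ^^^ y)).1 = (nimSplit n x).1 ^^^ (nimSplit n y).1 := by
        simp [nimSplit, Nat.and_xor_distrib_right]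
      have e2 : (nimSplit n (x ^^^ y)).2 = (nimSplit n x).2 ^^^ (nimSplit n y).2 := by
        simp [nimSplit, Nat.shiftRight_xor_distrib]
      have bx1 := split_fst_lt n x
      have by1 := split_fst_lt n y
      have bx2 := split_snd_lt n x hx
      have by2 := split_snd_lt n y hy
      simp only [nimProductHalf, hx0, hy0, hxy, if_false]
      rw [e1, e2]
      have hre : (nimSplit n x).2 ^^^ (nimSplit n y).2 ^^^ ((nimSplit n x).1 ^^^ (nimSplit n y).1)
          = ((nimSplit n x).2 ^^^ (nimSplit n x).1) ^^^ ((nimSplit n y).2 ^^^ (nimSplit n y).1) := by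
        simp [Nat.xor_comm, Nat.xor_left_comm]
      rw [hre]
      rw [ih _ _ bx2 by2]
      rw [ih _ _ (nph_lt n _ bx2) (nph_lt n _ by2)]
      rw [ih _ _ (Nat.xor_lt_two_pow bx2 bx1) (Nat.xor_lt_two_pow by2 by1)]
      rw [nimCombine_eq _ _ _ (Nat.xor_lt_two_pow (nph_lt n _ (nph_lt n _ bx2)) (nph_lt n _ (nph_lt n _ by2))),
          nimCombine_eq _ _ _ (nph_lt n _ (nph_lt n _ bx2)),
          nimCombine_eq _ _ _ (nph_lt n _ (nph_lt n _ by2))]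
      rw [Nat.shiftLeft_xor_distrib]
      simp [Nat.xor_assoc, Nat.xor_comm, Nat.xor_left_comm]

theorem nsqL_lt (n : Nat) : ∀ a, a < 2 ^ 2 ^ n → nsqL n a < 2 ^ 2 ^ n := by
  induction n with
  | zero => intro a ha; simpa [nsqL] using ha
  | succ n ih =>
    intro a ha
    simp only [nsqL]
    exact nimCombine_lt _ _ _
      (Nat.xor_lt_two_pow (nph_lt n _ (ih _ (split_snd_lt _ _ ha))) (ih _ (split_fst_lt n a)))
      (ih _ (split_snd_lt _ _ ha))

theorem nsqL_xor (n : Nat) : ∀ x y, x < 2 ^ 2 ^ n → y < 2 ^ 2 ^ n →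
    nsqL n (x ^^^ y) = nsqL n x ^^^ nsqL n y := by
  induction n with
  | zero => intro x y _ _; simp [nsqL]
  | succ n ih =>
    intro x y hx hy
    have e1 : (nimSplit n (x ^^^ y)).1 = (nimSplit n x).1 ^^^ (nimSplit n y).1 := by
      simp [nimSplit, Nat.and_xor_distrib_right]
    have e2 : (nimSplit n (x ^^^ y)).2 = (nimSplit n x).2 ^^^ (nimSplit n y).2 := by
      simp [nimSplit, Nat.shiftRight_xor_distrib]
    have bx1 := split_fst_lt n x
    have by1 := split_fst_lt n y
    have bx2 := split_snd_lt n x hx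
    have by2 := split_snd_lt n y hy
    simp only [nsqL]
    rw [e1, e2]
    rw [ih _ _ bx1 by1, ih _ _ bx2 by2]
    rw [nph_xor n _ _ (nsqL_lt n _ bx2) (nsqL_lt n _ by2)]
    rw [nimCombine_eq _ _ _ (Nat.xor_lt_two_pow
        (Nat.xor_lt_two_pow (nph_lt n _ (nsqL_lt n _ bx2)) (nph_lt n _ (nsqL_lt n _ by2)))
        (Nat.xor_lt_two_pow (nsqL_lt n _ bx1) (nsqL_lt n _ by1))),
      nimCombine_eq _ _ _ (Nat.xor_lt_two_pow (nph_lt n _ (nsqL_lt n _ bx2)) (nsqL_lt n _ bx1)),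
      nimCombine_eq _ _ _ (Nat.xor_lt_two_pow (nph_lt n _ (nsqL_lt n _ by2)) (nsqL_lt n _ by1))]
    rw [Nat.shiftLeft_xor_distrib]
    simp [Nat.xor_assoc, Nat.xor_comm, Nat.xor_left_comm]

theorem nsqL_zero (n : Nat) : nsqL n 0 = 0 := by
  induction n with
  | zero => simp [nsqL]
  | succ n ih => simp [nsqL, nimSplit_eq, ih, nph_zero, nimCombine]

theorem nsqL_one (n : Nat) : nsqL n 1 = 1 := by
  induction n with
  | zero => simp [nsqL]
  | succ n ih =>
    have h2 : (1:Nat) < 2 ^ 2 ^ n := by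
      calc (1:Nat) < 2 ^ 1 := by norm_num
      _ ≤ 2 ^ 2 ^ n := Nat.pow_le_pow_right (by norm_num) Nat.one_le_two_pow
    simp [nsqL, nimSplit_eq, Nat.mod_eq_of_lt h2, Nat.div_eq_of_lt h2, ih, nsqL_zero,
      nph_zero, nimCombine]

theorem nsqL_pad (n a : Nat) (ha : a < 2 ^ 2 ^ n) : nsqL (n+1) a = nsqL n a := by
  simp [nsqL, nimSplit_eq, Nat.mod_eq_of_lt ha, Nat.div_eq_of_lt ha, nsqL_zero, nph_zero,
    nimCombine]

theorem nsqL_mono (m n a : Nat) (h : m ≤ n) (ha : a < 2 ^ 2 ^ m) : nsqL n a = nsqL m a := by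
  induction n with
  | zero => have : m = 0 := by omega
            subst this; rfl
  | succ n ih =>
    by_cases h' : m = n + 1
    · subst h'; rfl
    · have hmn : m ≤ n := by omega
      have hbound : a < 2 ^ 2 ^ n := lt_of_lt_of_le ha
        (Nat.pow_le_pow_right (by norm_num) (Nat.pow_le_pow_right (by norm_num) hmn))
      rw [nsqL_pad n a hbound]
      exact ih hmn

theorem lt_pow_lv (a : Nat) (ha : 2 ≤ a) : a < 2 ^ 2 ^ nimLv a := by
  have hlog : Nat.log2 a ≠ 0 := by
    have := (Nat.le_log2 (n := a) (by omega)).2 (by rw [pow_one]; exact ha)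
    omega
  have hlv : nimLv a = Nat.log2 (Nat.log2 a) + 1 := by
    have h3 : ¬ a ≤ 1 := by omega
    have h4 : ¬ a = 0 := by omega
    simp [nimLv, pyIlog2, h3, h4, hlog]
  have h1 : a < 2 ^ (Nat.log2 a + 1) := Nat.lt_log2_self
  have h2 : Nat.log2 a < 2 ^ (Nat.log2 (Nat.log2 a) + 1) := Nat.lt_log2_self
  rw [hlv]
  exact lt_of_lt_of_le h1 (Nat.pow_le_pow_right (by norm_num) (by omega))

theorem nsqA_eq_nsqL (a : Nat) : ∀ n, a < 2 ^ 2 ^ n → nsqA a = nsqL n a := by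
  induction a using Nat.strong_induction_on with
  | _ a ih =>
    intro n ha
    by_cases h1 : a ≤ 1
    · rw [nsqA]
      rw [if_pos h1]
      interval_cases a
      · rw [nsqL_zero]
      · rw [nsqL_one]
    · have ha2 : 2 ≤ a := by omega
      have hm : a < 2 ^ 2 ^ nimLv a := lt_pow_lv a ha2
      have hmn : nimLv a ≤ n := by
        by_contra hcon
        push Not at hcon
        have hb1 : (2:Nat) ^ 2 ^ n ≤ 2 ^ (1 <<< (nimLv a - 1)) := by
          rw [Nat.one_shiftLeft]
          exact Nat.pow_le_pow_right (by norm_num)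
            (Nat.pow_le_pow_right (by norm_num) (by omega))
        have hb2 := pv_two_pow_lv_le a ha2
        omega
      rw [nsqL_mono (nimLv a) n a hmn hm]
      obtain ⟨k, hk⟩ : ∃ k, nimLv a = k + 1 := by
        refine ⟨nimLv a - 1, ?_⟩
        have : 1 ≤ nimLv a := by
          simp [nimLv, h1]
        omega
      have hlo := pv_split_fst_lt a ha2
      have hhi := pv_split_snd_lt (nimLv a - 1) a ha2
      rw [nsqA, if_neg h1]
      simp only [hk, Nat.add_sub_cancel] at hlo hhi ⊢
      rw [nsqL]
      rw [ih _ hlo k (split_fst_lt k a), ih _ hhi k (split_snd_lt k a (by rw [← hk]; exact hm))]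

theorem shift_half (n : Nat) : ((1 <<< (1 <<< n) : Nat)) >>> 1 = 2 ^ (2 ^ n - 1) := by
  have h1 := Nat.one_le_two_pow (n := n)
  rw [Nat.one_shiftLeft, Nat.one_shiftLeft, Nat.shiftRight_eq_div_pow, pow_one]
  have h2 : (2:Nat) ^ 2 ^ n = 2 ^ (2 ^ n - 1) * 2 := by
    rw [← pow_succ]; congr 1; omega
  rw [h2, Nat.mul_div_cancel _ (by norm_num)]

theorem mul_zero_both (n : Nat) : (∀ a, nimMulB n a 0 = 0) ∧ (∀ b, nimMulB n 0 b = 0) := by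
  induction n with
  | zero => exact ⟨fun a => by simp [nimMulB], fun b => by simp [nimMulB]⟩
  | succ n ih =>
    obtain ⟨h1, h2⟩ := ih
    exact ⟨fun a => by simp [nimMulB, h1, h2], fun b => by simp [nimMulB, h1, h2]⟩

theorem mul_zero_right (n : Nat) : ∀ a, nimMulB n a 0 = 0 := (mul_zero_both n).1

theorem mul_zero_left (n : Nat) : ∀ b, nimMulB n 0 b = 0 := (mul_zero_both n).2

theorem mul_half (n : Nat) : ∀ a, a < 2 ^ 2 ^ n →
    nimMulB n a (2 ^ (2 ^ n - 1)) = nimProductHalf n a := by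
  induction n with
  | zero =>
    intro a ha
    interval_cases a <;> simp [nimMulB, nimProductHalf]
  | succ n ih =>
    intro a ha
    by_cases h0 : a = 0
    · subst h0; rw [mul_zero_left, nph_zero]
    · have hle : 2 ^ n ≤ 2 ^ (n+1) - 1 := by
        have h1 := Nat.one_le_two_pow (n := n)
        have h2 : (2:Nat) ^ (n+1) = 2 * 2 ^ n := by ring
        omega
      have hcl : (2:Nat) ^ (2 ^ (n+1) - 1) &&& (1 <<< (1 <<< n) - 1) = 0 := by
        rw [Nat.one_shiftLeft, Nat.one_shiftLeft, Nat.and_two_pow_sub_one_eq_mod]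
        exact Nat.mod_eq_zero_of_dvd (pow_dvd_pow 2 hle)
      have hch : (2:Nat) ^ (2 ^ (n+1) - 1) >>> (1 <<< n) = 2 ^ (2 ^ n - 1) := by
        rw [Nat.one_shiftLeft, Nat.shiftRight_eq_div_pow, Nat.pow_div hle (by norm_num)]
        congr 1
        have h1 := Nat.one_le_two_pow (n := n)
        have h2 : (2:Nat) ^ (n+1) = 2 * 2 ^ n := by ring
        omega
      have e1 : a &&& (1 <<< (1 <<< n) - 1) = (nimSplit n a).1 := rfl
      have e2 : a >>> (1 <<< n) = (nimSplit n a).2 := rfl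
      have b1 := split_fst_lt n a
      have b2 := split_snd_lt n a ha
      simp only [nimMulB]
      rw [hcl, hch, shift_half, e1, e2]
      rw [mul_zero_right, Nat.zero_xor]
      rw [ih _ b2, ih _ (Nat.xor_lt_two_pow b1 b2), ih _ (nph_lt n _ b2)]
      simp only [nimProductHalf, h0, if_false]
      rw [nimCombine_eq _ _ _ (nph_lt n _ (nph_lt n _ b2))]
      rw [← Nat.one_shiftLeft]
      simp [Nat.xor_assoc, Nat.xor_comm, Nat.xor_left_comm, Nat.xor_zero]

theorem mul_sq (n : Nat) : ∀ a, a < 2 ^ 2 ^ n → nimMulB n a a = nsqL n a := by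
  induction n with
  | zero => intro a ha; simp [nimMulB, nsqL, Nat.and_self]
  | succ n ih =>
    intro a ha
    have e1 : a &&& (1 <<< (1 <<< n) - 1) = (nimSplit n a).1 := rfl
    have e2 : a >>> (1 <<< n) = (nimSplit n a).2 := rfl
    have b1 := split_fst_lt n a
    have b2 := split_snd_lt n a ha
    simp only [nimMulB]
    rw [e1, e2, shift_half]
    rw [ih _ b1, ih _ b2, ih _ (Nat.xor_lt_two_pow b1 b2)]
    rw [nsqL_xor n _ _ b1 b2]
    rw [mul_half n _ (nsqL_lt n _ b2)]
    show _ = nsqL (n+1) a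
    rw [nsqL]
    rw [nimCombine_eq _ _ _
      (Nat.xor_lt_two_pow (nph_lt n _ (nsqL_lt n _ b2)) (nsqL_lt n _ b1))]
    rw [← Nat.one_shiftLeft]
    simp [Nat.xor_assoc, Nat.xor_comm, Nat.xor_left_comm, Nat.xor_zero]

-- ===== VERDICT (by name: the statement is the Claim_ definition above) =====
theorem nimber_square_spec : Claim_equal_nimber_square := by
  intro a _
  unfold Spec_nimber_square nimber_square nimber_square_alt
  by_cases h : a ≤ 1
  · simp [h]
  · simp only [h, if_false]
    have hN : 2 ≤ a.toNat := by omega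
    have hlog : Nat.log2 a.toNat ≠ 0 := by
      have := (Nat.le_log2 (n := a.toNat) (by omega)).2 (by rw [pow_one]; exact hN)
      omega
    have hbit : bitLen (bitLen a.toNat - 1) = nimLv a.toNat := by
      have h4 : a.toNat ≠ 0 := by omega
      have h5 : ¬ a.toNat ≤ 1 := by omega
      simp [bitLen, nimLv, pyIlog2, h4, h5, hlog]
    rw [hbit]
    have hb := lt_pow_lv a.toNat hN
    rw [nsqA_eq_nsqL a.toNat (nimLv a.toNat) hb, mul_sq (nimLv a.toNat) a.toNat hb]
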